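-- pv_equiv track=rewrite | github.com/Philosoft/leetcode-practice-python | 1020__number_of_enclaves.py | numEnclavesSmarter
-- ===== SOURCE A (Python) =====
-- from typing import List, Set, Tuple
--
-- def numEnclavesSmarter(grid: List[List[int]]) -> int:
--     def sink(row: int, col: int) -> None:
--         grid[row][col] = 0
--         directions = [
--             (0, 1),
--             (0, -1),
--             (1, 0),
--             (-1, 0),
--         ]
--
--         for dr, dc in directions:
--             new_row, new_col = row + dr, col + dc
--             if 0 <= new_row < len(grid) and 0 <= new_col < len(grid[new_row]) and grid[new_row][new_col] == 1:
--                 sink(new_row, new_col)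
--
--     for col in range(len(grid[0])):
--         if grid[0][col] == 1:
--             sink(0, col)
--         if grid[-1][col] == 1:
--             sink(len(grid) - 1, col)
--
--     for row in range(len(grid)):
--         if grid[row][0] == 1:
--             sink(row, 0)
--         if grid[row][-1] == 1:
--             sink(row, len(grid[row]) - 1)
--
--     return sum([sum(row) for row in grid])
-- ===== SOURCE B (Python) =====
-- from typing import List
--
--
-- def numEnclavesSmarter(grid: List[List[int]]) -> int:
--     # Iterative flood-fill: seed every boundary cell, sink with an explicit stack.
--     # Mutates grid in place (zeroes boundary-connected land), like the original.
--     rows = len(grid)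
--     seeds = []
--     for col in range(len(grid[0])):
--         seeds.append((0, col))
--         seeds.append((rows - 1, col))
--     for row in range(rows):
--         seeds.append((row, 0))
--         seeds.append((row, len(grid[row]) - 1))
--     stack = seeds[::-1]  # reversed so cells are visited in boundary-scan order
--     while stack:
--         r, c = stack.pop()
--         if 0 <= r < rows and 0 <= c < len(grid[r]) and grid[r][c] == 1:
--             grid[r][c] = 0
--             stack.extend(((r - 1, c), (r + 1, c), (r, c - 1), (r, c + 1)))
--     return sum(map(sum, grid))
-- ===== Notes on version B (the rewrite author's own statement) =====
-- stated objective: idiomatic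
-- what changed: Replaces the recursive per-seed sink helper with a single iterative flood-fill over an explicit stack seeded with all boundary cells at once (value checks moved to pop time), keeping the same final grid and sum.
-- outside the precondition, e.g. on numEnclavesSmarter([[1], [], [1]]): A raises IndexError, B returns 0; on numEnclavesSmarter([[1, 1], [1]]): A raises IndexError, B returns 0
import Mathlib
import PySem

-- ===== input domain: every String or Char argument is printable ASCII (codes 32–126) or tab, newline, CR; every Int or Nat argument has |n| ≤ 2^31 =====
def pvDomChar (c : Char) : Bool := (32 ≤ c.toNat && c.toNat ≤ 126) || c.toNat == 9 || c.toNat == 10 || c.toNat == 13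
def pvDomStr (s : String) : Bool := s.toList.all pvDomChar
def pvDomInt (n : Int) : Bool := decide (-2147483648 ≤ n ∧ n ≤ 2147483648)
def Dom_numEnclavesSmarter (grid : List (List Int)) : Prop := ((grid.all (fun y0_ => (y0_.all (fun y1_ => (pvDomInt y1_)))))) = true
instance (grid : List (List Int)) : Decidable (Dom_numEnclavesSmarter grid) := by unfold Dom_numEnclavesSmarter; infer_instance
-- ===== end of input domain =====

-- B replaces A's recursive per-seed `sink` helper with one iterative explicit-stack flood fill over
-- all boundary seeds; in Python both mutate the caller's grid the same way (same zeroed cells).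

-- ===== PORT A =====
-- shared grid primitives (both Pythons index and assign grid cells the same way)

def pvRow (g : List (List Int)) (r : Int) : List Int := (PySem.List.pyGet? g r).getD []

def pvGetCell (g : List (List Int)) (r c : Int) : Int := (PySem.List.pyGet? (pvRow g r) c).getD 0

def pvSetCell (g : List (List Int)) (r c v : Int) : List (List Int) :=
  g.set r.toNat ((g.getD r.toNat []).set c.toNat v)

def pvInb (g : List (List Int)) (r c : Int) : Bool :=
  decide (0 ≤ r) && decide (r < (g.length : Int)) && decide (0 ≤ c) && decide (c < ((pvRow g r).length : Int))

def pvGuard (g : List (List Int)) (r c : Int) : Bool := pvInb g r c && (pvGetCell g r c == 1)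

def pvOnes (g : List (List Int)) : Nat := (g.map (fun row => row.count 1)).sum

def pvSinkF : Nat → List (List Int) → Int → Int → List (List Int)
  | 0, g, _, _ => g
  | n + 1, g, r, c =>
    let g1 := pvSetCell g r c 0
    let g2 := if pvGuard g1 r (c + 1) then pvSinkF n g1 r (c + 1) else g1
    let g3 := if pvGuard g2 r (c - 1) then pvSinkF n g2 r (c - 1) else g2
    let g4 := if pvGuard g3 (r + 1) c then pvSinkF n g3 (r + 1) c else g3
    if pvGuard g4 (r - 1) c then pvSinkF n g4 (r - 1) c else g4

def pvSinkA (g : List (List Int)) (r c : Int) : List (List Int) := pvSinkF (pvOnes g + 1) g r c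

def pvBody1 (h : List (List Int)) (col : Nat) : List (List Int) :=
  let h1 := if pvGetCell h 0 (col : Int) == 1 then pvSinkA h 0 (col : Int) else h
  if pvGetCell h1 (-1) (col : Int) == 1 then pvSinkA h1 ((h1.length : Int) - 1) (col : Int) else h1

def pvBody2 (h : List (List Int)) (row : Nat) : List (List Int) :=
  let h1 := if pvGetCell h (row : Int) 0 == 1 then pvSinkA h (row : Int) 0 else h
  if pvGetCell h1 (row : Int) (-1) == 1 then
    pvSinkA h1 (row : Int) (((pvRow h1 (row : Int)).length : Int) - 1)
  else h1

def numEnclavesSmarter (grid : List (List Int)) : Int :=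
  let g1 := (List.range (pvRow grid 0).length).foldl pvBody1 grid
  let g2 := (List.range g1.length).foldl pvBody2 g1
  (g2.map (fun row => row.sum)).sum

-- ===== PORT B =====
-- termination helpers for the flood-fill loop, needed by `pvFlood`'s decreasing_by:
-- popping a live in-bounds land cell strictly decreases the number of 1-cells

theorem count_set_zero_lt (l : List Int) (i : Nat) (hi : i < l.length) (h1 : l[i] = 1) :
    (l.set i 0).count 1 < l.count 1 := by
  induction l generalizing i with
  | nil => simp at hi
  | cons a l ih =>
    cases i with
    | zero => simp_all
    | succ j =>
      simp at hi h1
      simpa [List.count_cons] using ih j hi h1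

theorem ones_set_lt (g : List (List Int)) (rn : Nat) (row' : List Int) (hrn : rn < g.length)
    (hrow : row'.count 1 < (g.getD rn []).count 1) : pvOnes (g.set rn row') < pvOnes g := by
  induction g generalizing rn with
  | nil => simp at hrn
  | cons a g ih =>
    cases rn with
    | zero => simp_all [pvOnes]
    | succ j =>
      simp at hrn
      have := ih j hrn (by simpa using hrow)
      simp [pvOnes] at this ⊢; omega

theorem pvRow_of_nonneg (g : List (List Int)) (r : Int) (h0 : 0 ≤ r) :
    pvRow g r = g.getD r.toNat [] := by
  simp [pvRow, PySem.List.pyGet?_of_nonneg g h0, List.getD_eq_getElem?_getD]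

theorem pvGuard_elim (g : List (List Int)) (r c : Int) (h : pvGuard g r c = true) :
    0 ≤ r ∧ r.toNat < g.length ∧ 0 ≤ c ∧ c.toNat < (g.getD r.toNat []).length ∧
      (g.getD r.toNat [])[c.toNat]? = some 1 := by
  simp only [pvGuard, pvInb, Bool.and_eq_true, decide_eq_true_eq, beq_iff_eq] at h
  obtain ⟨⟨⟨⟨h0, h1⟩, h2⟩, h3⟩, h4⟩ := h
  have hr : r.toNat < g.length := by omega
  rw [pvRow_of_nonneg g r h0] at h3
  have hc : c.toNat < (g.getD r.toNat []).length := by omega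
  refine ⟨h0, hr, h2, hc, ?_⟩
  rw [pvGetCell, pvRow_of_nonneg g r h0, PySem.List.pyGet?_of_nonneg _ h2] at h4
  rw [List.getElem?_eq_getElem hc] at h4 ⊢
  simpa using h4

theorem pvOnes_set_lt (g : List (List Int)) (r c : Int) (h : pvGuard g r c = true) :
    pvOnes (pvSetCell g r c 0) < pvOnes g := by
  obtain ⟨h0, hr, h2, hc, hval⟩ := pvGuard_elim g r c h
  apply ones_set_lt _ _ _ hr
  apply count_set_zero_lt _ _ hc
  rw [List.getElem?_eq_getElem hc] at hval
  have : (g.getD r.toNat [])[c.toNat] = 1 := by simpa using hval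
  simpa [List.getD_eq_getElem?_getD, List.getElem?_eq_getElem hr] using this

-- B's while loop: stack top at the head (Python's `stack.pop()` from the end of `seeds[::-1]`
-- processes seeds in order; the four pushed neighbours are popped LIFO)

def pvFlood : List (List Int) → List (Int × Int) → List (List Int)
  | g, [] => g
  | g, (r, c) :: st =>
    if h : pvGuard g r c then
      pvFlood (pvSetCell g r c 0) ((r, c + 1) :: (r, c - 1) :: (r + 1, c) :: (r - 1, c) :: st)
    else
      pvFlood g st
  termination_by g st => 5 * pvOnes g + st.length
  decreasing_by
  · have := pvOnes_set_lt g r c h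
    simp only [List.length_cons]
    omega
  · simp only [List.length_cons]
    omega

def numEnclavesSmarter_alt (grid : List (List Int)) : Int :=
  let rows := grid.length
  let seeds1 := (List.range (pvRow grid 0).length).foldl
    (fun acc col => (acc ++ [((0 : Int), (col : Int))]) ++ [((rows : Int) - 1, (col : Int))])
    ([] : List (Int × Int))
  let seeds := (List.range rows).foldl
    (fun acc row => (acc ++ [((row : Int), (0 : Int))]) ++
      [((row : Int), ((pvRow grid (row : Int)).length : Int) - 1)]) seeds1
  let g2 := pvFlood grid seeds
  (g2.map (fun row => row.sum)).sum

-- ===== PRECONDITION & SPEC =====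
-- Pre_ excludes exactly the inputs on which A raises IndexError: the empty grid, a grid with an
-- empty row, and a ragged grid whose last row is shorter than its first row.
def Pre_numEnclavesSmarter (grid : List (List Int)) : Prop :=
  grid ≠ [] ∧ (∀ row ∈ grid, row ≠ ([] : List Int)) ∧
    (grid.headD []).length ≤ (grid.getLastD []).length
instance (grid : List (List Int)) : Decidable (Pre_numEnclavesSmarter grid) := by
  unfold Pre_numEnclavesSmarter; infer_instance
def pvWitness_numEnclavesSmarter : List (List Int) := [[0, 0, 0], [0, 1, 0], [0, 0, 0]]

def Spec_numEnclavesSmarter (grid : List (List Int)) (out : Int) : Prop := out = numEnclavesSmarter_alt grid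
instance (grid : List (List Int)) (out : Int) : Decidable (Spec_numEnclavesSmarter grid out) := by unfold Spec_numEnclavesSmarter; infer_instance

-- ===== CLAIM (what is proved, stated in full; the proofs are below) =====
def Claim_equal_numEnclavesSmarter : Prop := ∀ (grid : List (List Int)), Dom_numEnclavesSmarter grid → Pre_numEnclavesSmarter grid → Spec_numEnclavesSmarter grid (numEnclavesSmarter grid)

-- ===== LEMMAS AND PROOFS =====

theorem count_set_zero_le (l : List Int) (i : Nat) : (l.set i 0).count 1 ≤ l.count 1 := by
  induction l generalizing i with
  | nil => simp
  | cons a l ih =>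
    cases i with
    | zero => simp [List.count_cons]
    | succ j => simpa [List.count_cons] using ih j

theorem ones_set_le (g : List (List Int)) (rn : Nat) (row' : List Int)
    (hrow : row'.count 1 ≤ (g.getD rn []).count 1) : pvOnes (g.set rn row') ≤ pvOnes g := by
  induction g generalizing rn with
  | nil => simp
  | cons a g ih =>
    cases rn with
    | zero => simp_all [pvOnes]
    | succ j =>
      have := ih j (by simpa using hrow)
      simp [pvOnes] at this ⊢
      omega

theorem pvOnes_setCell_le (g : List (List Int)) (r c : Int) :
    pvOnes (pvSetCell g r c 0) ≤ pvOnes g :=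
  ones_set_le _ _ _ (count_set_zero_le _ _)

def pvStepF (n : Nat) (h : List (List Int)) (p : Int × Int) : List (List Int) :=
  if pvGuard h p.1 p.2 then pvSinkF n h p.1 p.2 else h

def pvStep (h : List (List Int)) (p : Int × Int) : List (List Int) :=
  if pvGuard h p.1 p.2 then pvSinkA h p.1 p.2 else h

theorem pvSinkF_succ (n : Nat) (g : List (List Int)) (r c : Int) :
    pvSinkF (n + 1) g r c =
      pvStepF n (pvStepF n (pvStepF n (pvStepF n (pvSetCell g r c 0) (r, c + 1)) (r, c - 1))
        (r + 1, c)) (r - 1, c) := rfl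

theorem pvGuard_ones_pos (g : List (List Int)) (r c : Int) (h : pvGuard g r c = true) :
    1 ≤ pvOnes g := by
  obtain ⟨h0, hr, h2, hc, hval⟩ := pvGuard_elim g r c h
  have hmem : (1 : Int) ∈ g.getD r.toNat [] := List.mem_of_getElem? hval
  have hcnt : 1 ≤ (g.getD r.toNat []).count 1 := List.count_pos_iff.mpr hmem
  have hgmem : g.getD r.toNat [] ∈ g := by
    rw [List.getD_eq_getElem _ _ hr]; exact List.getElem_mem hr
  calc 1 ≤ (g.getD r.toNat []).count 1 := hcnt
    _ ≤ pvOnes g := List.single_le_sum (by simp) _ (List.mem_map_of_mem hgmem)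

theorem pvOnes_sinkF_le (n : Nat) : ∀ (g : List (List Int)) (r c : Int),
    pvOnes (pvSinkF n g r c) ≤ pvOnes g := by
  induction n with
  | zero => intro g r c; simp [pvSinkF]
  | succ n ih =>
    intro g r c
    have hstep : ∀ h p, pvOnes (pvStepF n h p) ≤ pvOnes h := by
      intro h p
      unfold pvStepF; split
      · exact ih h p.1 p.2
      · exact le_refl _
    rw [pvSinkF_succ]
    calc pvOnes (pvStepF n (pvStepF n (pvStepF n (pvStepF n (pvSetCell g r c 0) (r, c + 1)) (r, c - 1)) (r + 1, c)) (r - 1, c))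
        ≤ pvOnes (pvStepF n (pvStepF n (pvStepF n (pvSetCell g r c 0) (r, c + 1)) (r, c - 1)) (r + 1, c)) := hstep _ _
      _ ≤ pvOnes (pvStepF n (pvStepF n (pvSetCell g r c 0) (r, c + 1)) (r, c - 1)) := hstep _ _
      _ ≤ pvOnes (pvStepF n (pvSetCell g r c 0) (r, c + 1)) := hstep _ _
      _ ≤ pvOnes (pvSetCell g r c 0) := hstep _ _
      _ ≤ pvOnes g := pvOnes_setCell_le g r c

theorem pvSinkF_mono (k : Nat) : ∀ (g : List (List Int)) (r c : Int) (n m : Nat),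
    pvOnes g ≤ k → pvGuard g r c = true → pvOnes g ≤ n → pvOnes g ≤ m →
    pvSinkF n g r c = pvSinkF m g r c := by
  induction k with
  | zero =>
    intro g r c n m hk hg _ _
    have := pvGuard_ones_pos g r c hg; omega
  | succ k ih =>
    intro g r c n m hk hg hn hm
    have h1 : 1 ≤ pvOnes g := pvGuard_ones_pos g r c hg
    obtain ⟨n', rfl⟩ : ∃ n', n = n' + 1 := ⟨n - 1, by omega⟩
    obtain ⟨m', rfl⟩ : ∃ m', m = m' + 1 := ⟨m - 1, by omega⟩
    have hset : pvOnes (pvSetCell g r c 0) ≤ pvOnes g - 1 := by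
      have := pvOnes_set_lt g r c hg; omega
    have hstep : ∀ h p, pvOnes h ≤ pvOnes g - 1 →
        pvStepF n' h p = pvStepF m' h p ∧ pvOnes (pvStepF n' h p) ≤ pvOnes g - 1 := by
      intro h p hh
      by_cases hgp : pvGuard h p.1 p.2 = true
      · have heq := ih h p.1 p.2 n' m' (by omega) hgp (by omega) (by omega)
        refine ⟨by simp [pvStepF, hgp, heq], ?_⟩
        have := pvOnes_sinkF_le n' h p.1 p.2
        simp only [pvStepF, hgp, if_true]
        omega
      · simp only [pvStepF, hgp, if_false, Bool.false_eq_true, true_and]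
        exact hh
    rw [pvSinkF_succ, pvSinkF_succ]
    obtain ⟨e1, o1⟩ := hstep (pvSetCell g r c 0) (r, c + 1) hset
    rw [e1]
    obtain ⟨e2, o2⟩ := hstep _ (r, c - 1) (e1 ▸ o1)
    rw [e2]
    obtain ⟨e3, o3⟩ := hstep _ (r + 1, c) (e2 ▸ o2)
    rw [e3]
    obtain ⟨e4, _⟩ := hstep _ (r - 1, c) (e3 ▸ o3)
    rw [e4]

theorem pvStepF_eq_pvStep (n : Nat) (h : List (List Int)) (p : Int × Int)
    (hle : pvOnes h ≤ n) : pvStepF n h p = pvStep h p := by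
  by_cases hgp : pvGuard h p.1 p.2 = true
  · simp only [pvStepF, pvStep, hgp, if_true, pvSinkA]
    exact pvSinkF_mono (pvOnes h) h p.1 p.2 n (pvOnes h + 1) (le_refl _) hgp hle (by omega)
  · simp [pvStepF, pvStep, hgp]

theorem pvSinkA_unfold (g : List (List Int)) (r c : Int) (hg : pvGuard g r c = true) :
    pvSinkA g r c =
      pvStep (pvStep (pvStep (pvStep (pvSetCell g r c 0) (r, c + 1)) (r, c - 1)) (r + 1, c))
        (r - 1, c) := by
  have hset : pvOnes (pvSetCell g r c 0) ≤ pvOnes g - 1 := by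
    have := pvOnes_set_lt g r c hg; omega
  have hone : 1 ≤ pvOnes g := pvGuard_ones_pos g r c hg
  have hstep : ∀ h p, pvOnes h ≤ pvOnes g - 1 →
      pvStepF (pvOnes g) h p = pvStep h p ∧ pvOnes (pvStep h p) ≤ pvOnes g - 1 := by
    intro h p hh
    have he := pvStepF_eq_pvStep (pvOnes g) h p (by omega)
    refine ⟨he, ?_⟩
    rw [← he]
    unfold pvStepF; split
    · have := pvOnes_sinkF_le (pvOnes g) h p.1 p.2; omega
    · exact hh
  have hA : pvSinkA g r c = pvSinkF (pvOnes g - 1 + 1) g r c := by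
    unfold pvSinkA
    exact pvSinkF_mono (pvOnes g) g r c _ _ (le_refl _) hg (by omega) (by omega)
  rw [hA, pvSinkF_succ]
  have e0 : pvOnes g - 1 = pvOnes g - 1 := rfl
  -- rewrite each stage with fuel (pvOnes g - 1): note pvStepF (pvOnes g - 1) vs pvStepF (pvOnes g)
  have hstep' : ∀ h p, pvOnes h ≤ pvOnes g - 1 →
      pvStepF (pvOnes g - 1) h p = pvStep h p ∧ pvOnes (pvStep h p) ≤ pvOnes g - 1 := by
    intro h p hh
    have he := pvStepF_eq_pvStep (pvOnes g - 1) h p (by omega)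
    refine ⟨he, ?_⟩
    rw [← he]
    unfold pvStepF; split
    · have := pvOnes_sinkF_le (pvOnes g - 1) h p.1 p.2; omega
    · exact hh
  obtain ⟨e1, o1⟩ := hstep' (pvSetCell g r c 0) (r, c + 1) hset
  rw [e1]
  obtain ⟨e2, o2⟩ := hstep' _ (r, c - 1) o1
  rw [e2]
  obtain ⟨e3, o3⟩ := hstep' _ (r + 1, c) o2
  rw [e3]
  obtain ⟨e4, _⟩ := hstep' _ (r - 1, c) o3
  rw [e4]

def pvShape (g : List (List Int)) : List Nat := g.map List.length

theorem pvOptLen (o : Option (List Int)) : (o.getD []).length = (o.map List.length).getD 0 := by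
  cases o <;> rfl

theorem pvShape_setCell (g : List (List Int)) (r c v : Int) :
    pvShape (pvSetCell g r c v) = pvShape g := by
  unfold pvShape pvSetCell
  rw [List.map_set, List.length_set]
  rcases lt_or_ge r.toNat g.length with h | h
  · rw [List.getD_eq_getElem _ _ h]
    rw [← List.getElem_map (f := List.length) (h := by simpa using h)]
    exact List.set_getElem_self (by simpa using h)
  · exact List.set_eq_of_length_le (by simpa using h)

theorem pvShape_length (h g : List (List Int)) (hsh : pvShape h = pvShape g) :
    h.length = g.length := by
  have h1 := congrArg List.length hsh
  rwa [pvShape, pvShape, List.length_map, List.length_map] at h1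

theorem pvRowLen_shape (h g : List (List Int)) (hsh : pvShape h = pvShape g) (r : Int)
    (h0 : 0 ≤ r) : (pvRow h r).length = (pvRow g r).length := by
  rw [pvRow, pvRow, PySem.List.pyGet?_of_nonneg _ h0, PySem.List.pyGet?_of_nonneg _ h0]
  rw [pvOptLen, pvOptLen, ← List.getElem?_map, ← List.getElem?_map]
  unfold pvShape at hsh; rw [hsh]

theorem pvRow_neg_one (h : List (List Int)) (hne : h ≠ []) :
    pvRow h (-1) = pvRow h ((h.length : Int) - 1) := by
  have hl : 1 ≤ h.length := List.length_pos_iff.mpr hne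
  have h0 : (0 : Int) ≤ (h.length : Int) - 1 := by omega
  rw [pvRow, pvRow, PySem.List.pyGet?_neg_one, PySem.List.pyGet?_of_nonneg _ h0,
    List.getLast?_eq_getElem?]
  have ht : ((h.length : Int) - 1).toNat = h.length - 1 := by omega
  rw [ht]

theorem pvShape_sinkF (n : Nat) : ∀ (g : List (List Int)) (r c : Int),
    pvShape (pvSinkF n g r c) = pvShape g := by
  induction n with
  | zero => intro g r c; simp [pvSinkF]
  | succ n ih =>
    intro g r c
    have hstep : ∀ h p, pvShape (pvStepF n h p) = pvShape h := by
      intro h p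
      unfold pvStepF; split
      · exact ih h p.1 p.2
      · rfl
    rw [pvSinkF_succ, hstep, hstep, hstep, hstep, pvShape_setCell]

theorem pvShape_step (h : List (List Int)) (p : Int × Int) :
    pvShape (pvStep h p) = pvShape h := by
  unfold pvStep; split
  · exact pvShape_sinkF _ h p.1 p.2
  · rfl

theorem pvFlood_nil (g : List (List Int)) : pvFlood g [] = g := by
  unfold pvFlood; rfl

theorem pvFlood_cons_true (g : List (List Int)) (r c : Int) (st : List (Int × Int))
    (h : pvGuard g r c = true) :
    pvFlood g ((r, c) :: st) =
      pvFlood (pvSetCell g r c 0) ((r, c + 1) :: (r, c - 1) :: (r + 1, c) :: (r - 1, c) :: st) := by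
  rw [pvFlood]; simp [h]

theorem pvFlood_cons_false (g : List (List Int)) (r c : Int) (st : List (Int × Int))
    (h : ¬ pvGuard g r c = true) :
    pvFlood g ((r, c) :: st) = pvFlood g st := by
  rw [pvFlood]; simp [h]

theorem pvFloodL (k : Nat) : ∀ (cells : List (Int × Int)) (g : List (List Int))
    (st : List (Int × Int)), pvOnes g ≤ k →
    pvFlood g (cells ++ st) = pvFlood (cells.foldl pvStep g) st := by
  induction k with
  | zero =>
    intro cells
    induction cells with
    | nil => intro g st _; simp
    | cons p cs ih =>
      intro g st hk
      obtain ⟨r, c⟩ := p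
      have hg : ¬ pvGuard g r c = true := by
        intro hgt
        have := pvGuard_ones_pos g r c hgt; omega
      rw [List.cons_append, pvFlood_cons_false _ _ _ _ hg, List.foldl_cons]
      have hstep : pvStep g (r, c) = g := by simp [pvStep, hg]
      rw [hstep]
      exact ih g st hk
  | succ k ih =>
    intro cells
    induction cells with
    | nil => intro g st _; simp
    | cons p cs ihc =>
      intro g st hk
      obtain ⟨r, c⟩ := p
      by_cases hg : pvGuard g r c = true
      · have hset : pvOnes (pvSetCell g r c 0) ≤ k := by
          have := pvOnes_set_lt g r c hg; omega
        rw [List.cons_append, pvFlood_cons_true _ _ _ _ hg]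
        have e1 : (r, c + 1) :: (r, c - 1) :: (r + 1, c) :: (r - 1, c) :: (cs ++ st) =
            ([(r, c + 1), (r, c - 1), (r + 1, c), (r - 1, c)] ++ cs) ++ st := by simp
        rw [e1, ih _ (pvSetCell g r c 0) st hset, List.foldl_append]
        have e2 : List.foldl pvStep (pvSetCell g r c 0)
            [(r, c + 1), (r, c - 1), (r + 1, c), (r - 1, c)] = pvSinkA g r c := by
          rw [pvSinkA_unfold g r c hg]; simp [List.foldl]
        rw [e2, List.foldl_cons]
        have hstep : pvStep g (r, c) = pvSinkA g r c := by simp [pvStep, hg]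
        rw [hstep]
      · rw [List.cons_append, pvFlood_cons_false _ _ _ _ hg, List.foldl_cons]
        have hstep : pvStep g (r, c) = g := by simp [pvStep, hg]
        rw [hstep]
        exact ihc g st hk

theorem pvFlood_eq_foldl (g : List (List Int)) (cells : List (Int × Int)) :
    pvFlood g cells = cells.foldl pvStep g := by
  have := pvFloodL (pvOnes g) cells g [] (le_refl _)
  simpa [pvFlood_nil] using this

theorem pvRow_zero_headD (g : List (List Int)) : pvRow g 0 = g.headD [] := by
  cases g <;> simp [pvRow, PySem.List.pyGet?_zero]

theorem pvRow_neg_one_getLastD (g : List (List Int)) : pvRow g (-1) = g.getLastD [] := by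
  rw [pvRow, PySem.List.pyGet?_neg_one, List.getLastD_eq_getLast?]

theorem pvGetCell_neg_one (h : List (List Int)) (r : Int) (hne : pvRow h r ≠ []) :
    pvGetCell h r (-1) = pvGetCell h r (((pvRow h r).length : Int) - 1) := by
  have hl : 1 ≤ (pvRow h r).length := List.length_pos_iff.mpr hne
  have h0 : (0 : Int) ≤ ((pvRow h r).length : Int) - 1 := by omega
  rw [pvGetCell, pvGetCell, PySem.List.pyGet?_neg_one, PySem.List.pyGet?_of_nonneg _ h0,
    List.getLast?_eq_getElem?]
  have ht : (((pvRow h r).length : Int) - 1).toNat = (pvRow h r).length - 1 := by omega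
  rw [ht]

theorem pvShape_foldl_step (cells : List (Int × Int)) : ∀ (h : List (List Int)),
    pvShape (List.foldl pvStep h cells) = pvShape h := by
  induction cells with
  | nil => intro h; rfl
  | cons p cs ih => intro h; rw [List.foldl_cons, ih, pvShape_step]

theorem pvLoop1 (g : List (List Int)) (hne : g ≠ [])
    (hlast : (pvRow g 0).length ≤ (pvRow g (-1)).length) :
    ∀ (cols : List Nat) (h : List (List Int)), pvShape h = pvShape g →
      (∀ x ∈ cols, x < (pvRow g 0).length) →
      List.foldl pvBody1 h cols =
        List.foldl pvStep h
          (cols.flatMap (fun x => [((0 : Int), (x : Int)), ((g.length : Int) - 1, (x : Int))])) := by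
  intro cols
  induction cols with
  | nil => intro h _ _; rfl
  | cons x cs ih =>
    intro h hsh hcols
    have hm : 1 ≤ g.length := List.length_pos_iff.mpr hne
    have hhlen : h.length = g.length := pvShape_length h g hsh
    have hx : x < (pvRow g 0).length := hcols x (by simp)
    -- first conditional is pvStep h (0, x)
    have hinb1 : pvInb h 0 (x : Int) = true := by
      simp only [pvInb, Bool.and_eq_true, decide_eq_true_eq]
      have hrl : (pvRow h 0).length = (pvRow g 0).length := pvRowLen_shape h g hsh 0 le_rfl
      refine ⟨⟨⟨le_rfl, by omega⟩, by omega⟩, ?_⟩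
      rw [hrl]; omega
    have hs1 : pvStep h ((0 : Int), (x : Int)) =
        (if pvGetCell h 0 (x : Int) == 1 then pvSinkA h 0 (x : Int) else h) := by
      simp only [pvStep, pvGuard, hinb1, Bool.true_and]
    set h1 := if pvGetCell h 0 (x : Int) == 1 then pvSinkA h 0 (x : Int) else h with hh1
    have hsh1 : pvShape h1 = pvShape g := by rw [← hs1, pvShape_step, hsh]
    have hlen1 : h1.length = g.length := pvShape_length _ _ hsh1
    have hne1 : h1 ≠ [] := by
      intro e
      rw [e] at hlen1; simp at hlen1; omega
    -- second conditional is pvStep h1 (g.length - 1, x)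
    have hinb2 : pvInb h1 ((g.length : Int) - 1) (x : Int) = true := by
      simp only [pvInb, Bool.and_eq_true, decide_eq_true_eq]
      have hrl : (pvRow h1 ((g.length : Int) - 1)).length =
          (pvRow g ((g.length : Int) - 1)).length :=
        pvRowLen_shape h1 g hsh1 _ (by omega)
      have hrg : pvRow g ((g.length : Int) - 1) = pvRow g (-1) := (pvRow_neg_one g hne).symm
      refine ⟨⟨⟨by omega, by omega⟩, by omega⟩, ?_⟩
      rw [hrl, hrg]
      omega
    have hget2 : pvGetCell h1 (-1) (x : Int) = pvGetCell h1 ((g.length : Int) - 1) (x : Int) := by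
      rw [pvGetCell, pvGetCell, pvRow_neg_one h1 hne1, hlen1]
    have hs2 : pvStep h1 (((g.length : Int) - 1), (x : Int)) =
        (if pvGetCell h1 (-1) (x : Int) == 1 then
          pvSinkA h1 ((h1.length : Int) - 1) (x : Int) else h1) := by
      simp only [pvStep, pvGuard, hinb2, Bool.true_and, hget2, hlen1]
    have hbody : pvBody1 h x = pvStep (pvStep h ((0 : Int), (x : Int))) (((g.length : Int) - 1), (x : Int)) := by
      rw [pvBody1, hs1, hs2, ← hh1]
    rw [List.foldl_cons, hbody]
    have hshnext : pvShape (pvStep (pvStep h ((0 : Int), (x : Int))) (((g.length : Int) - 1), (x : Int))) = pvShape g := by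
      rw [pvShape_step, pvShape_step, hsh]
    have := ih (pvStep (pvStep h ((0 : Int), (x : Int))) (((g.length : Int) - 1), (x : Int)))
      hshnext (fun y hy => hcols y (by simp [hy]))
    rw [this]
    simp [List.foldl_cons]

theorem pvLoop2 (g : List (List Int)) (hrows : ∀ row ∈ g, row ≠ ([] : List Int)) :
    ∀ (rows : List Nat) (h : List (List Int)), pvShape h = pvShape g →
      (∀ x ∈ rows, x < g.length) →
      List.foldl pvBody2 h rows =
        List.foldl pvStep h
          (rows.flatMap (fun x => [((x : Int), (0 : Int)),
            ((x : Int), ((pvRow g (x : Int)).length : Int) - 1)])) := by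
  intro rows
  induction rows with
  | nil => intro h _ _; rfl
  | cons x cs ih =>
    intro h hsh hrows'
    have hhlen : h.length = g.length := pvShape_length h g hsh
    have hx : x < g.length := hrows' x (by simp)
    have hrowg : pvRow g (x : Int) = g[x] := by
      rw [pvRow, PySem.List.pyGet?_of_nonneg _ (by omega)]
      simp [List.getElem?_eq_getElem (by simpa using hx)]
    have hrgne : pvRow g (x : Int) ≠ [] := by
      rw [hrowg]; exact hrows _ (List.getElem_mem hx)
    have hrglen : 1 ≤ (pvRow g (x : Int)).length := List.length_pos_iff.mpr hrgne
    have hinb1 : pvInb h (x : Int) 0 = true := by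
      simp only [pvInb, Bool.and_eq_true, decide_eq_true_eq]
      have hrl : (pvRow h (x : Int)).length = (pvRow g (x : Int)).length :=
        pvRowLen_shape h g hsh _ (by omega)
      refine ⟨⟨⟨by omega, by omega⟩, le_rfl⟩, ?_⟩
      rw [hrl]; omega
    have hs1 : pvStep h ((x : Int), (0 : Int)) =
        (if pvGetCell h (x : Int) 0 == 1 then pvSinkA h (x : Int) 0 else h) := by
      simp only [pvStep, pvGuard, hinb1, Bool.true_and]
    set h1 := if pvGetCell h (x : Int) 0 == 1 then pvSinkA h (x : Int) 0 else h with hh1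
    have hsh1 : pvShape h1 = pvShape g := by rw [← hs1, pvShape_step, hsh]
    have hrl1 : (pvRow h1 (x : Int)).length = (pvRow g (x : Int)).length :=
      pvRowLen_shape h1 g hsh1 _ (by omega)
    have hr1ne : pvRow h1 (x : Int) ≠ [] := by
      intro e
      rw [e] at hrl1; simp at hrl1; omega
    have hinb2 : pvInb h1 (x : Int) (((pvRow g (x : Int)).length : Int) - 1) = true := by
      simp only [pvInb, Bool.and_eq_true, decide_eq_true_eq]
      have hl1 : h1.length = g.length := pvShape_length _ _ hsh1
      refine ⟨⟨⟨by omega, by omega⟩, by omega⟩, ?_⟩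
      rw [hrl1]; omega
    have hget2 : pvGetCell h1 (x : Int) (-1) =
        pvGetCell h1 (x : Int) (((pvRow g (x : Int)).length : Int) - 1) := by
      rw [pvGetCell_neg_one h1 (x : Int) hr1ne, hrl1]
    have hs2 : pvStep h1 ((x : Int), ((pvRow g (x : Int)).length : Int) - 1) =
        (if pvGetCell h1 (x : Int) (-1) == 1 then
          pvSinkA h1 (x : Int) (((pvRow h1 (x : Int)).length : Int) - 1) else h1) := by
      simp only [pvStep, pvGuard, hinb2, Bool.true_and, hget2, hrl1]
    have hbody : pvBody2 h x =
        pvStep (pvStep h ((x : Int), (0 : Int))) ((x : Int), ((pvRow g (x : Int)).length : Int) - 1) := by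
      rw [pvBody2, hs1, hs2, ← hh1]
    rw [List.foldl_cons, hbody]
    have hshnext : pvShape (pvStep (pvStep h ((x : Int), (0 : Int))) ((x : Int), ((pvRow g (x : Int)).length : Int) - 1)) = pvShape g := by
      rw [pvShape_step, pvShape_step, hsh]
    have := ih (pvStep (pvStep h ((x : Int), (0 : Int))) ((x : Int), ((pvRow g (x : Int)).length : Int) - 1))
      hshnext (fun y hy => hrows' y (by simp [hy]))
    rw [this]
    simp [List.foldl_cons]

theorem pvMain (g : List (List Int)) (h1 : g ≠ []) (h2 : ∀ row ∈ g, row ≠ ([] : List Int))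
    (h3 : (g.headD []).length ≤ (g.getLastD []).length) :
    numEnclavesSmarter g = numEnclavesSmarter_alt g := by
  have hlast : (pvRow g 0).length ≤ (pvRow g (-1)).length := by
    rw [pvRow_zero_headD, pvRow_neg_one_getLastD]; exact h3
  have hg1 : (List.range (pvRow g 0).length).foldl pvBody1 g =
      List.foldl pvStep g
        ((List.range (pvRow g 0).length).flatMap
          (fun x => [((0 : Int), (x : Int)), ((g.length : Int) - 1, (x : Int))])) :=
    pvLoop1 g h1 hlast _ g rfl (by intro y hy; simpa using hy)
  have hshg1 : pvShape (List.foldl pvStep g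
      ((List.range (pvRow g 0).length).flatMap
        (fun x => [((0 : Int), (x : Int)), ((g.length : Int) - 1, (x : Int))]))) = pvShape g :=
    pvShape_foldl_step _ _
  have hlen1 : (List.foldl pvStep g
      ((List.range (pvRow g 0).length).flatMap
        (fun x => [((0 : Int), (x : Int)), ((g.length : Int) - 1, (x : Int))]))).length = g.length :=
    pvShape_length _ _ hshg1
  show ((((List.range ((List.range (pvRow g 0).length).foldl pvBody1 g).length).foldl pvBody2
      ((List.range (pvRow g 0).length).foldl pvBody1 g)).map (fun row => row.sum)).sum) = _
  rw [hg1, hlen1,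
    pvLoop2 g h2 _ _ hshg1 (by intro y hy; simpa using hy)]
  show _ = ((pvFlood g _).map (fun row => row.sum)).sum
  have hfun1 : (fun (acc : List (Int × Int)) (col : Int) =>
      (acc ++ [((0 : Int), col)]) ++ [((g.length : Int) - 1, col)]) =
      fun (acc : List (Int × Int)) (col : Int) =>
        acc ++ [((0 : Int), col), ((g.length : Int) - 1, col)] := by
    funext acc col; simp
  have hfun2 : (fun (acc : List (Int × Int)) (row : Int) =>
      (acc ++ [(row, (0 : Int))]) ++ [(row, ((pvRow g row).length : Int) - 1)]) =
      fun (acc : List (Int × Int)) (row : Int) =>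
        acc ++ [(row, (0 : Int)), (row, ((pvRow g row).length : Int) - 1)] := by
    funext acc row; simp
  rw [hfun1, hfun2, PySem.List.foldl_append_eq_flatMap, PySem.List.foldl_append_eq_flatMap,
    List.nil_append, pvFlood_eq_foldl, List.foldl_append]

-- ===== VERDICT (by name: the statement is the Claim_ definition above) =====
theorem numEnclavesSmarter_spec : Claim_equal_numEnclavesSmarter := by
  intro grid _ hPre
  obtain ⟨h1, h2, h3⟩ := hPre
  unfold Spec_numEnclavesSmarter
  exact pvMain grid h1 h2 h3
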